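-- pv_equiv track=rewrite | github.com/xronocode/kompakt | pdf_compress.py | _fuzzy_single
-- ===== SOURCE A (Python) =====
-- def _fuzzy_single(q: str, n: str) -> tuple:
--     """Subsequence match одного токена q в строке n (оба уже lower())."""
--     qi = 0; score = 0; consecutive = 0; last_ni = -1
--     for ni, ch in enumerate(n):
--         if qi < len(q) and ch == q[qi]:
--             qi += 1
--             if last_ni == ni - 1:
--                 consecutive += 1
--                 score += 10 + consecutive * 5
--             else:
--                 consecutive = 0
--                 score += 1
--             last_ni = ni
--     matched = qi == len(q)
--     if matched and n.startswith(q):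
--         score += 100
--     return matched, score
-- ===== SOURCE B (Python) =====
-- def _fuzzy_single(q: str, n: str) -> tuple:
--     # Phase 1: greedy subsequence scan collecting the matched indices.
--     idxs = []
--     qi = 0
--     for ni, ch in enumerate(n):
--         if qi < len(q) and ch == q[qi]:
--             idxs.append(ni)
--             qi += 1
--     matched = len(idxs) == len(q)
--     # Phase 2: score the index list (prev=-1 so a match at 0 counts as consecutive).
--     score = 0
--     consecutive = 0
--     prev = -1
--     for idx in idxs:
--         if idx == prev + 1:
--             consecutive += 1
--             score += 10 + consecutive * 5
--         else:
--             consecutive = 0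
--             score += 1
--         prev = idx
--     if matched and n.startswith(q):
--         score += 100
--     return matched, score
-- ===== Notes on version B (the rewrite author's own statement) =====
-- stated objective: alternative
-- what changed: Replaces A's single pass with interleaved match/score state by a two-phase decomposition: a greedy scan that collects the matched index list, then a separate scoring fold over that list (prev initialised to -1).
import Mathlib
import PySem

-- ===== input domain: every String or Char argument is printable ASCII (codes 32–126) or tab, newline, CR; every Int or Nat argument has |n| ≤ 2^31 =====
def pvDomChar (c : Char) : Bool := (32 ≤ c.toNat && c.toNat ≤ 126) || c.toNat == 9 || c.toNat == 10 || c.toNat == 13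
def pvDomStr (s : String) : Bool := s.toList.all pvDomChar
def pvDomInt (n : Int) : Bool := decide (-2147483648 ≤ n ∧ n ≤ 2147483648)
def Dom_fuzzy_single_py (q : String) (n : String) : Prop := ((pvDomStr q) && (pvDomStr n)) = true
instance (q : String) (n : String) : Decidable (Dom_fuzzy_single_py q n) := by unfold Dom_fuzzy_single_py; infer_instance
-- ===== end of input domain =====

-- B re-implements the fuzzy subsequence scorer in two phases (collect matched indices, then score the index list); objective: alternative decomposition, same cost.


-- ===== PORT A =====
-- A's single-pass loop state: (qi, score, consecutive, last_ni)
def fuzzyStepA (qL : List Char) (st : Int × Int × Int × Int) (p : Int × Char) : Int × Int × Int × Int :=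
  let qi := st.1; let score := st.2.1; let consecutive := st.2.2.1; let last_ni := st.2.2.2
  let ni := p.1; let ch := p.2
  if qi < (qL.length : Int) ∧ PySem.List.pyGet? qL qi = some ch then
    if last_ni = ni - 1 then
      (qi + 1, score + (10 + (consecutive + 1) * 5), consecutive + 1, ni)
    else
      (qi + 1, score + 1, 0, ni)
  else st

def fuzzy_single_py (q : String) (n : String) : Bool × Int :=
  let s := (PySem.List.enumerate n.toList 0).foldl (fuzzyStepA q.toList) (0, 0, 0, -1)
  let matched := s.1 == (q.toList.length : Int)
  let score := if matched && PySem.Str.startswith n q then s.2.1 + 100 else s.2.1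
  (matched, score)

-- ===== PORT B =====
-- Phase 1: greedy scan of n collecting the matched indices (qL = still-unmatched suffix of q).
def fuzzyCollect : List Char → List Char → Int → List Int
  | [], _, _ => []
  | _ :: ns, [], ni => fuzzyCollect ns [] (ni + 1)
  | c :: ns, qc :: qs, ni =>
      if c = qc then ni :: fuzzyCollect ns qs (ni + 1)
      else fuzzyCollect ns (qc :: qs) (ni + 1)

-- Phase 2 step: state (score, consecutive, prev).
def fuzzyStepB (st : Int × Int × Int) (idx : Int) : Int × Int × Int :=
  if idx = st.2.2 + 1 then (st.1 + (10 + (st.2.1 + 1) * 5), st.2.1 + 1, idx)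
  else (st.1 + 1, 0, idx)

def fuzzy_single_py_alt (q : String) (n : String) : Bool × Int :=
  let idxs := fuzzyCollect n.toList q.toList 0
  let matched := ((idxs.length : Int) == (q.toList.length : Int))
  let base := (idxs.foldl fuzzyStepB (0, 0, -1)).1
  let score := if matched && PySem.Str.startswith n q then base + 100 else base
  (matched, score)

-- ===== PRECONDITION & SPEC =====
def Spec_fuzzy_single_py (q : String) (n : String) (out : Bool × Int) : Prop := out = fuzzy_single_py_alt q n
instance (q : String) (n : String) (out : Bool × Int) : Decidable (Spec_fuzzy_single_py q n out) := by unfold Spec_fuzzy_single_py; infer_instance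

-- ===== CLAIM (what is proved, stated in full; the proofs are below) =====
def Claim_equal_fuzzy_single_py : Prop := ∀ (q : String) (n : String), Dom_fuzzy_single_py q n → Spec_fuzzy_single_py q n (fuzzy_single_py q n)

-- ===== LEMMAS AND PROOFS =====

-- A's fold over the enumerated suffix of n, started at q-pointer k, equals B's
-- scoring fold over the indices collected from the remaining suffix of q.
lemma fuzzy_loop_eq (qF : List Char) :
    ∀ (nL : List Char) (k : Nat) (ni : Int) (st : Int × Int × Int), k ≤ qF.length →
      (PySem.List.enumerate nL ni).foldl (fuzzyStepA qF) ((k : Int), st) =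
        (((k + (fuzzyCollect nL (qF.drop k) ni).length : Nat) : Int),
          (fuzzyCollect nL (qF.drop k) ni).foldl fuzzyStepB st) := by
  intro nL
  induction nL with
  | nil => intro k ni st hk; simp [fuzzyCollect, PySem.List.enumerate]
  | cons c ns ih =>
    intro k ni st hk
    rw [PySem.List.enumerate_cons]
    by_cases hlt : k < qF.length
    · have hdrop : qF.drop k = qF[k] :: qF.drop (k + 1) := List.drop_eq_getElem_cons hlt
      have hget : PySem.List.pyGet? qF (k : Int) = some qF[k] := by
        simp [PySem.List.pyGet?_natCast, List.getElem?_eq_getElem hlt]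
      by_cases hc : c = qF[k]
      · -- match: both sides consume one q char and record ni
        have hcond : ((k : Int) < ((qF.length : Nat) : Int) ∧ PySem.List.pyGet? qF (k : Int) = some c) :=
          ⟨by exact_mod_cast hlt, by rw [hget, hc]⟩
        have hstep : fuzzyStepA qF ((k : Int), st) (ni, c) =
            ((((k + 1 : Nat)) : Int), fuzzyStepB st ni) := by
          simp only [fuzzyStepA, fuzzyStepB]
          rw [if_pos hcond]
          by_cases hlast : st.2.2 = ni - 1
          · rw [if_pos hlast, if_pos (show ni = st.2.2 + 1 by omega)]
            push_cast; ring_nf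
          · rw [if_neg hlast, if_neg (show ¬ ni = st.2.2 + 1 by omega)]
            push_cast; ring_nf
        rw [List.foldl_cons, hstep, ih (k + 1) (ni + 1) (fuzzyStepB st ni) (by omega), hdrop]
        simp only [fuzzyCollect, if_pos hc, List.foldl_cons, List.length_cons]
        simp only [Prod.mk.injEq]
        exact ⟨by push_cast; ring, trivial⟩
      · -- mismatch: both sides skip this character of n
        have hstep : fuzzyStepA qF ((k : Int), st) (ni, c) = ((k : Int), st) := by
          simp only [fuzzyStepA]
          rw [if_neg]
          rintro ⟨-, h2⟩
          rw [hget] at h2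
          exact hc (Option.some.inj h2).symm
        rw [List.foldl_cons, hstep, ih k (ni + 1) st hk, hdrop]
        simp only [fuzzyCollect, if_neg hc]
    · -- q exhausted: A's guard is false forever, collect yields []
      have hk' : k = qF.length := by omega
      have hdrop : qF.drop k = [] := by simp [hk']
      have hstep : fuzzyStepA qF ((k : Int), st) (ni, c) = ((k : Int), st) := by
        simp only [fuzzyStepA]
        rw [if_neg]; rintro ⟨h1, -⟩; exact absurd (by exact_mod_cast h1) (by omega)
      have hnil : ∀ m (j : Int), fuzzyCollect m ([] : List Char) j = [] := by
        intro m; induction m with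
        | nil => intro j; rfl
        | cons a as ihm => intro j; simp [fuzzyCollect, ihm]
      rw [List.foldl_cons, hstep, ih k (ni + 1) st hk, hdrop, hnil, hnil]

-- ===== VERDICT (by name: the statement is the Claim_ definition above) =====
theorem fuzzy_single_py_spec : Claim_equal_fuzzy_single_py := by
  intro q n _
  unfold Spec_fuzzy_single_py fuzzy_single_py fuzzy_single_py_alt
  have h := fuzzy_loop_eq q.toList n.toList 0 0 (0, 0, -1) (Nat.zero_le _)
  simp only [Nat.cast_zero, List.drop_zero, Nat.zero_add] at h
  rw [h]
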